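-- pv_equiv track=rewrite | github.com/liamdn8/M-DRA | mdra_dataset/manager.py | _analyze_cluster_features
-- ===== SOURCE A (Python) =====
-- from typing import List, Dict, Any, Optional
--
-- def _analyze_cluster_features(clusters: List[Dict]) -> Dict[str, Any]:
--     """Analyze cluster feature distribution."""
--     mano_count = sum(1 for c in clusters if c.get('mano_supported'))
--     sriov_count = sum(1 for c in clusters if c.get('sriov_supported'))
--     both_count = sum(1 for c in clusters if c.get('mano_supported') and c.get('sriov_supported'))
--
--     return {
--         'mano_supported': mano_count,
--         'sriov_supported': sriov_count,
--         'both_features': both_count,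
--         'basic_only': len(clusters) - mano_count - sriov_count + both_count
--     }
-- ===== SOURCE B (Python) =====
-- def _analyze_cluster_features(clusters):
--     """Analyze cluster feature distribution (single pass, four accumulators)."""
--     mano = sriov = both = basic = 0
--     for c in clusters:
--         m = c.get('mano_supported')
--         s = c.get('sriov_supported')
--         if m:
--             mano += 1
--         if s:
--             sriov += 1
--         if m and s:
--             both += 1
--         if not m and not s:
--             basic += 1
--     return {
--         'mano_supported': mano,
--         'sriov_supported': sriov,
--         'both_features': both,
--         'basic_only': basic,
--     }
-- ===== Notes on version B (the rewrite author's own statement) =====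
-- stated objective: simpler
-- what changed: Replaces three separate generator-sum scans plus inclusion-exclusion arithmetic for 'basic_only' with one loop maintaining four counters, counting 'basic_only' directly as clusters with neither flag.
import Mathlib
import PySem

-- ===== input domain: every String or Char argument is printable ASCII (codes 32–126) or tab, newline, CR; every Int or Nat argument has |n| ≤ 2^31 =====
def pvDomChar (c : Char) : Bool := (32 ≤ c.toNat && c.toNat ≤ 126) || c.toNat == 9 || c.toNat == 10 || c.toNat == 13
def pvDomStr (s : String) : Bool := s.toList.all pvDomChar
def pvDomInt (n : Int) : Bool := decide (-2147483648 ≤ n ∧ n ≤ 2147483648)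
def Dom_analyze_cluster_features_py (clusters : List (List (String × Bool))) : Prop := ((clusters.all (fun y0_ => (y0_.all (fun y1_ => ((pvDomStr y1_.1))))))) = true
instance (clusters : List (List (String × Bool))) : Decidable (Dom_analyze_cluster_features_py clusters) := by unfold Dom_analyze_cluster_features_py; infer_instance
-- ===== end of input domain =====

-- ===== PORT A =====
-- B replaces A's three generator-sum scans and inclusion-exclusion with one loop and four counters; return value only.
-- c.get(k): first-match lookup in the assoc list, missing key falsy (exact for Bool values)
def pyGetFlagA (c : List (String × Bool)) (k : String) : Bool :=
  ((PySem.Dict.mk c).get? k).getD false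

def analyze_cluster_features_py (clusters : List (List (String × Bool))) : List (String × Int) :=
  let mano_count : Int := clusters.foldl (fun acc c => if pyGetFlagA c "mano_supported" then acc + 1 else acc) 0
  let sriov_count : Int := clusters.foldl (fun acc c => if pyGetFlagA c "sriov_supported" then acc + 1 else acc) 0
  let both_count : Int := clusters.foldl (fun acc c => if pyGetFlagA c "mano_supported" && pyGetFlagA c "sriov_supported" then acc + 1 else acc) 0
  [("mano_supported", mano_count),
   ("sriov_supported", sriov_count),
   ("both_features", both_count),
   ("basic_only", (clusters.length : Int) - mano_count - sriov_count + both_count)]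

-- ===== PORT B =====
def altStep (acc : Int × Int × Int × Int) (c : List (String × Bool)) : Int × Int × Int × Int :=
  let m := ((PySem.Dict.mk c).get? "mano_supported").getD false
  let s := ((PySem.Dict.mk c).get? "sriov_supported").getD false
  (acc.1 + (if m then 1 else 0),
   acc.2.1 + (if s then 1 else 0),
   acc.2.2.1 + (if m && s then 1 else 0),
   acc.2.2.2 + (if !m && !s then 1 else 0))

def analyze_cluster_features_py_alt (clusters : List (List (String × Bool))) : List (String × Int) :=
  let r := clusters.foldl altStep (0, 0, 0, 0)
  [("mano_supported", r.1),
   ("sriov_supported", r.2.1),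
   ("both_features", r.2.2.1),
   ("basic_only", r.2.2.2)]

-- ===== PRECONDITION & SPEC =====
def Spec_analyze_cluster_features_py (clusters : List (List (String × Bool))) (out : List (String × Int)) : Prop := out = analyze_cluster_features_py_alt clusters
instance (clusters : List (List (String × Bool))) (out : List (String × Int)) : Decidable (Spec_analyze_cluster_features_py clusters out) := by unfold Spec_analyze_cluster_features_py; infer_instance

-- ===== CLAIM (what is proved, stated in full; the proofs are below) =====
def Claim_equal_analyze_cluster_features_py : Prop := ∀ (clusters : List (List (String × Bool))), Dom_analyze_cluster_features_py clusters → Spec_analyze_cluster_features_py clusters (analyze_cluster_features_py clusters)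

-- ===== LEMMAS AND PROOFS =====

theorem countIf_shift (p : List (String × Bool) → Bool) (cls : List (List (String × Bool))) (a : Int) :
    cls.foldl (fun acc c => if p c then acc + 1 else acc) a
      = a + cls.foldl (fun acc c => if p c then acc + 1 else acc) 0 := by
  induction cls generalizing a with
  | nil => simp
  | cons c cls ih =>
    simp only [List.foldl_cons]
    rw [ih, ih (if p c then 0 + 1 else 0)]
    split <;> omega

theorem altFold_eq (cls : List (List (String × Bool))) (a b c d : Int) :
    cls.foldl altStep (a, b, c, d)
      = (a + cls.foldl (fun acc c => if pyGetFlagA c "mano_supported" then acc + 1 else acc) 0,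
         b + cls.foldl (fun acc c => if pyGetFlagA c "sriov_supported" then acc + 1 else acc) 0,
         c + cls.foldl (fun acc c => if pyGetFlagA c "mano_supported" && pyGetFlagA c "sriov_supported" then acc + 1 else acc) 0,
         d + ((cls.length : Int)
              - cls.foldl (fun acc c => if pyGetFlagA c "mano_supported" then acc + 1 else acc) 0
              - cls.foldl (fun acc c => if pyGetFlagA c "sriov_supported" then acc + 1 else acc) 0
              + cls.foldl (fun acc c => if pyGetFlagA c "mano_supported" && pyGetFlagA c "sriov_supported" then acc + 1 else acc) 0)) := by
  induction cls generalizing a b c d with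
  | nil => simp
  | cons x cls ih =>
    simp only [List.foldl_cons, List.length_cons]
    rw [ih]
    rw [countIf_shift _ cls (if pyGetFlagA x "mano_supported" then (0:Int) + 1 else 0)]
    rw [countIf_shift _ cls (if pyGetFlagA x "sriov_supported" then (0:Int) + 1 else 0)]
    rw [countIf_shift _ cls (if pyGetFlagA x "mano_supported" && pyGetFlagA x "sriov_supported" then (0:Int) + 1 else 0)]
    simp only [altStep]
    cases hm : pyGetFlagA x "mano_supported" <;> cases hs : pyGetFlagA x "sriov_supported" <;>
      simp only [pyGetFlagA] at hm hs <;>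
      simp [hm, hs, Prod.ext_iff] <;> (try (push_cast; ring)) <;> simp

-- ===== VERDICT (by name: the statement is the Claim_ definition above) =====
theorem analyze_cluster_features_py_spec : Claim_equal_analyze_cluster_features_py := by
  intro cls _
  unfold Spec_analyze_cluster_features_py analyze_cluster_features_py analyze_cluster_features_py_alt
  rw [altFold_eq]
  simp
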